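-- pv_equiv track=rewrite | github.com/sklykov/zernpy | src/zernpy/calculations/find_pols_coeffs.py | make_orders_coeffs
-- ===== SOURCE A (Python) =====
-- def make_orders_coeffs(defined_coeff: dict, max_order: int, minus: bool = False) -> dict:
--     """
--     Generate dictionary with radial orders of polynomials: coefficients as key: value pairs.
--
--     Note that non-zero coefficients will be parsed from defined_coeff input.
--
--     Parameters
--     ----------
--     defined_coeff : dict
--         Dictionary with non-zero integer coefficients (values) for radial orders as keys.
--     max_order : int
--         Maximum radial order n of polynomials.
--     minus : bool, optional
--         Used for getting inverse coefficients. The default is False.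
--
--     Raises
--     ------
--     ValueError
--         If provided max_order and way how the values/keys specified in defined_coeff is wrong.
--
--     Returns
--     -------
--     dict
--         Keys - radial orders of polynomials (n), values -integers with polynomials coefficients.
--
--     """
--     # Initialize dictionary with zero coefficients
--     coefficients = {}
--     for i in range(max_order+1):
--         coefficients[i] = 0
--     # Setting provided already defined coefficients to the initialized dictionary
--     if len(defined_coeff.keys()) > 0:
--         for key, value in defined_coeff.items():
--             if key in coefficients.keys():
--                 if not minus:
--                     coefficients[key] = value
--                 else:
--                     coefficients[key] = -value
--             else:
--                 raise ValueError("Generated coefficients don't include specified order / value")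
--     return coefficients
-- ===== SOURCE B (Python) =====
-- def make_orders_coeffs(defined_coeff: dict, max_order: int, minus: bool = False) -> dict:
--     """Walk the defined orders in sorted order, emitting zeros only for the gaps between them."""
--     coefficients = {}
--     prev = 0
--     for key in sorted(defined_coeff):
--         if key < 0 or key > max_order:
--             raise ValueError("Generated coefficients don't include specified order / value")
--         value = defined_coeff[key]
--         for i in range(prev, key):
--             coefficients[i] = 0
--         coefficients[key] = -value if minus else value
--         prev = key + 1
--     for i in range(prev, max_order + 1):
--         coefficients[i] = 0
--     return coefficients
-- ===== Notes on version B (the rewrite author's own statement) =====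
-- stated objective: alternative
-- what changed: A zero-fills a dict over the whole order range and then overwrites entries while iterating defined_coeff with a membership test; B sorts the defined orders and builds the dict in sorted-merge fashion, emitting zeros only for the gaps between consecutive defined orders, so no membership test or overwrite ever happens.
import Mathlib
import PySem

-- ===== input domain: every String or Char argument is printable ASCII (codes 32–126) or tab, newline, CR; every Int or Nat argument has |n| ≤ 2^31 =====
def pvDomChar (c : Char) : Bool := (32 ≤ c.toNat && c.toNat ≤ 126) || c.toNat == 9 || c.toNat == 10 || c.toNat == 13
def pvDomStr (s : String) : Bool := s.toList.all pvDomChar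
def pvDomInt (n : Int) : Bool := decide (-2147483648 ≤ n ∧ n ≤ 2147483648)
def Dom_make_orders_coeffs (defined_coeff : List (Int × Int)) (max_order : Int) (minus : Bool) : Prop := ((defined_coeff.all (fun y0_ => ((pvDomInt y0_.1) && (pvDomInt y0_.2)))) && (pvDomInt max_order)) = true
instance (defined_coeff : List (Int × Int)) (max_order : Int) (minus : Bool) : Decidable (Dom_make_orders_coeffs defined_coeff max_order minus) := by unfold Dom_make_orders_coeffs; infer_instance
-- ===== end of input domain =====

-- B replaces A's zero-fill-everything-then-overwrite by a sorted merge: walk the defined orders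
-- in sorted order and emit zeros only for the gaps between them (objective: alternative).

-- ===== PORT A =====
def make_orders_coeffs (defined_coeff : List (Int × Int)) (max_order : Int) (minus : Bool) : List (Int × Int) :=
  -- coefficients = {}; for i in range(max_order+1): coefficients[i] = 0
  let init : PySem.Dict Int Int :=
    (PySem.List.pyRange 0 (max_order + 1) 1).foldl (fun c i => c.insert i 0) PySem.Dict.empty
  -- for key, value in defined_coeff.items(): …
  ((defined_coeff.foldl (fun c kv =>
      if c.contains kv.1 then
        (if !minus then c.insert kv.1 kv.2 else c.insert kv.1 (-kv.2))
      else c  -- Python raises ValueError here; such inputs are excluded by Pre_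
    ) init)).items

-- ===== PORT B =====
def make_orders_coeffs_alt (defined_coeff : List (Int × Int)) (max_order : Int) (minus : Bool) : List (Int × Int) :=
  -- Source B raises ValueError exactly when some key is outside 0..max_order; those inputs are
  -- excluded by Pre_, so the port omits that branch and proceeds with the gap-fill merge.
  let st :=
    (PySem.List.sorted ((PySem.Dict.mk defined_coeff).keys) (fun x => x) false).foldl
      (fun (st : PySem.Dict Int Int × Int) key =>
        let value := (PySem.Dict.mk defined_coeff).getD key 0  -- defined_coeff[key]; key is present
        let filled := (PySem.List.pyRange st.2 key 1).foldl (fun c i => c.insert i 0) st.1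
        (filled.insert key (if minus then -value else value), key + 1))
      (PySem.Dict.empty, 0)
  ((PySem.List.pyRange st.2 (max_order + 1) 1).foldl (fun c i => c.insert i 0) st.1).items

-- ===== PRECONDITION & SPEC =====
-- Pre_ excludes (a) inputs with a key outside 0..max_order, on which Python A raises ValueError,
-- and (b) lists with duplicate keys, which do not correspond to any Python dict argument.
def Pre_make_orders_coeffs (defined_coeff : List (Int × Int)) (max_order : Int) (minus : Bool) : Prop :=
  (∀ kv ∈ defined_coeff, 0 ≤ kv.1 ∧ kv.1 ≤ max_order) ∧ (defined_coeff.map Prod.fst).Nodup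

instance (defined_coeff : List (Int × Int)) (max_order : Int) (minus : Bool) : Decidable (Pre_make_orders_coeffs defined_coeff max_order minus) := by unfold Pre_make_orders_coeffs; infer_instance

def pvWitness_make_orders_coeffs : (List (Int × Int)) × Int × Bool := ([(1, 5), (3, -2)], 4, false)

def Spec_make_orders_coeffs (defined_coeff : List (Int × Int)) (max_order : Int) (minus : Bool) (out : List (Int × Int)) : Prop := out = make_orders_coeffs_alt defined_coeff max_order minus
instance (defined_coeff : List (Int × Int)) (max_order : Int) (minus : Bool) (out : List (Int × Int)) : Decidable (Spec_make_orders_coeffs defined_coeff max_order minus out) := by unfold Spec_make_orders_coeffs; infer_instance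

-- ===== CLAIM (what is proved, stated in full; the proofs are below) =====
def Claim_equal_make_orders_coeffs : Prop := ∀ (defined_coeff : List (Int × Int)) (max_order : Int) (minus : Bool), Dom_make_orders_coeffs defined_coeff max_order minus → Pre_make_orders_coeffs defined_coeff max_order minus → Spec_make_orders_coeffs defined_coeff max_order minus (make_orders_coeffs defined_coeff max_order minus)

-- ===== LEMMAS AND PROOFS =====

-- the canonical value of the output at order i
def pvVal (defined_coeff : List (Int × Int)) (minus : Bool) (i : Int) : Int :=
  match (PySem.Dict.mk defined_coeff).get? i with
  | some v => if minus then -v else v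
  | none => 0

-- Zero-filling a fresh range p..q-1 onto a dict holding the canonical items for 0..p-1
-- extends it to the canonical items for 0..q-1, provided the filled orders are undefined.
lemma pv_fill (dc : List (Int × Int)) (minus : Bool) (p q : Int) (h0 : 0 ≤ p) (hpq : p ≤ q)
    (d : PySem.Dict Int Int)
    (hd : d.items = (PySem.List.pyRange 0 p 1).map (fun i => (i, pvVal dc minus i)))
    (hz : ∀ i, p ≤ i → i < q → pvVal dc minus i = 0) :
    ((PySem.List.pyRange p q 1).foldl (fun c i => c.insert i 0) d).items
      = (PySem.List.pyRange 0 q 1).map (fun i => (i, pvVal dc minus i)) := by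
  have hfresh : ∀ a ∈ PySem.List.pyRange p q 1, d.contains a = false := by
    intro a ha
    rw [PySem.List.mem_pyRange_one] at ha
    rw [PySem.Dict.contains_eq_decide_mem_keys]
    simp only [PySem.Dict.keys, hd, List.map_map, decide_eq_false_iff_not]
    intro hmem
    simp only [List.mem_map] at hmem
    obtain ⟨i, hi, hie⟩ := hmem
    rw [PySem.List.mem_pyRange_one] at hi
    simp only [Function.comp] at hie
    omega
  have h := PySem.Dict.items_foldl_insert_fresh (PySem.List.pyRange p q 1)
      (fun i => i) (fun _ => (0 : Int)) d hfresh
      (by simpa using PySem.List.nodup_pyRange_one p q)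
  simp only [] at h
  rw [h, hd, PySem.List.pyRange_one_append 0 p q h0 hpq, List.map_append]
  congr 1
  apply List.map_congr_left
  intro i hi
  rw [PySem.List.mem_pyRange_one] at hi
  rw [hz i hi.1 hi.2]

-- The gap-fill loop of B over a strictly increasing list of exactly the defined orders,
-- followed by the trailing zero-fill, yields the canonical items for 0..m.
lemma pv_gap (dc : List (Int × Int)) (minus : Bool) (m : Int) :
    ∀ (ks : List Int) (p : Int) (d : PySem.Dict Int Int),
      0 ≤ p → p ≤ m + 1 →
      ks.Pairwise (· < ·) →
      (∀ k ∈ ks, p ≤ k ∧ k ≤ m) →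
      (∀ i, p ≤ i → ((PySem.Dict.mk dc).get? i ≠ none ↔ i ∈ ks)) →
      d.items = (PySem.List.pyRange 0 p 1).map (fun i => (i, pvVal dc minus i)) →
      (let st := ks.foldl
          (fun (st : PySem.Dict Int Int × Int) key =>
            let value := (PySem.Dict.mk dc).getD key 0
            let filled := (PySem.List.pyRange st.2 key 1).foldl (fun c i => c.insert i 0) st.1
            (filled.insert key (if minus then -value else value), key + 1))
          (d, p)
       ((PySem.List.pyRange st.2 (m + 1) 1).foldl (fun c i => c.insert i 0) st.1).items)
        = (PySem.List.pyRange 0 (m + 1) 1).map (fun i => (i, pvVal dc minus i)) := by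
  intro ks
  induction ks with
  | nil =>
      intro p d h0 hpm _ _ hmem hd
      simp only [List.foldl_nil]
      exact pv_fill dc minus p (m + 1) h0 hpm d hd (by
        intro i hpi _
        unfold pvVal
        cases hg : (PySem.Dict.mk dc).get? i with
        | none => rfl
        | some v =>
            exfalso
            have := (hmem i hpi).mp (by simp [hg])
            simp at this)
  | cons k rest ih =>
      intro p d h0 hpm hpw hb hmem hd
      have hk := hb k (by simp)
      simp only [List.foldl_cons]
      -- the fill up to k
      have hz : ∀ i, p ≤ i → i < k → pvVal dc minus i = 0 := by
        intro i hpi hik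
        unfold pvVal
        cases hg : (PySem.Dict.mk dc).get? i with
        | none => rfl
        | some v =>
            exfalso
            have hi := (hmem i hpi).mp (by simp [hg])
            rcases List.mem_cons.mp hi with h | h
            · omega
            · have := (List.pairwise_cons.mp hpw).1 i h
              omega
      have hfill := pv_fill dc minus p k h0 (by omega) d hd hz
      -- inserting k is fresh
      set filled := (PySem.List.pyRange p k 1).foldl (fun c i => c.insert i 0) d with hf
      have hkval : (PySem.Dict.mk dc).get? k ≠ none := by
        exact (hmem k (by omega)).mpr (by simp)
      obtain ⟨v0, hv0⟩ := Option.ne_none_iff_exists'.mp hkval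
      have hnc : filled.contains k = false := by
        rw [PySem.Dict.contains_eq_decide_mem_keys]
        simp only [PySem.Dict.keys, hfill, List.map_map, decide_eq_false_iff_not]
        intro hmem'
        simp only [List.mem_map] at hmem'
        obtain ⟨i, hi, hie⟩ := hmem'
        rw [PySem.List.mem_pyRange_one] at hi
        simp only [Function.comp] at hie
        omega
      have hins : (filled.insert k (if minus then -((PySem.Dict.mk dc).getD k 0)
                      else (PySem.Dict.mk dc).getD k 0)).items
          = (PySem.List.pyRange 0 (k + 1) 1).map (fun i => (i, pvVal dc minus i)) := by
        rw [PySem.Dict.items_insert_of_not_contains _ _ hnc, hfill,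
            PySem.List.pyRange_one_succ_right (by omega : (0:Int) ≤ k), List.map_append]
        congr 1
        simp only [List.map_cons, List.map_nil]
        have : (PySem.Dict.mk dc).getD k 0 = v0 := by
          rw [PySem.Dict.getD_eq_get?_getD, hv0]; rfl
        unfold pvVal
        rw [this, hv0]
      -- now apply the induction hypothesis at p' = k + 1
      have := ih (k + 1)
        (filled.insert k (if minus then -((PySem.Dict.mk dc).getD k 0)
            else (PySem.Dict.mk dc).getD k 0))
        (by omega) (by omega)
        (List.pairwise_cons.mp hpw).2
        (by
          intro k' hk'
          have h1 := hb k' (by simp [hk'])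
          have h2 := (List.pairwise_cons.mp hpw).1 k' hk'
          omega)
        (by
          intro i hi
          rw [hmem i (by omega)]
          simp only [List.mem_cons]
          constructor
          · rintro (h | h)
            · omega
            · exact h
          · intro h; exact Or.inr h)
        hins
      simpa using this


-- A's zero-fill loop produces exactly the dict {i: 0 for i in range(max_order+1)}.
lemma pv_fill_eq (m : Int) :
    (PySem.List.pyRange 0 (m + 1) 1).foldl (fun c i => c.insert i 0) PySem.Dict.empty
      = PySem.Dict.mk ((PySem.List.pyRange 0 (m + 1) 1).map (fun i => (i, (0 : Int)))) := by
  apply PySem.Dict.ext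
  have h := PySem.Dict.items_foldl_insert_fresh (PySem.List.pyRange 0 (m + 1) 1)
      (fun i => i) (fun _ => (0 : Int)) PySem.Dict.empty
      (by intro a _; simp) (by simpa using PySem.List.nodup_pyRange_one 0 (m + 1))
  simpa using h

-- A's overwrite loop, started from a dict with items (i, g i) over the range, produces the
-- range items with looked-up values substituted.
lemma pv_loop_eq (minus : Bool) (m : Int) :
    ∀ (l : List (Int × Int)) (g : Int → Int),
      (∀ kv ∈ l, 0 ≤ kv.1 ∧ kv.1 ≤ m) → (l.map Prod.fst).Nodup →
      (l.foldl (fun c kv =>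
          if c.contains kv.1 then
            (if !minus then c.insert kv.1 kv.2 else c.insert kv.1 (-kv.2))
          else c)
        (PySem.Dict.mk ((PySem.List.pyRange 0 (m + 1) 1).map (fun i => (i, g i))))).items
      = (PySem.List.pyRange 0 (m + 1) 1).map (fun i =>
          (i, match (PySem.Dict.mk l).get? i with
              | some v => if minus then -v else v
              | none => g i)) := by
  intro l
  induction l with
  | nil =>
      intro g _ _
      simp [PySem.Dict.get?]
  | cons kv rest ih =>
      intro g hb hnd
      obtain ⟨k, v⟩ := kv
      have hk : 0 ≤ k ∧ k ≤ m := hb (k, v) (by simp)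
      have hkr : k ∈ PySem.List.pyRange 0 (m + 1) 1 := by
        rw [PySem.List.mem_pyRange_one]; omega
      have hcont : (PySem.Dict.mk ((PySem.List.pyRange 0 (m + 1) 1).map (fun i => (i, g i)))).contains k = true := by
        rw [PySem.Dict.contains_eq_decide_mem_keys]
        simp only [PySem.Dict.keys_mk, List.map_map]
        simpa using hkr
      set w : Int := if !minus then v else -v with hw
      have hstep :
          (if (PySem.Dict.mk ((PySem.List.pyRange 0 (m + 1) 1).map (fun i => (i, g i)))).contains k then
            (if !minus then (PySem.Dict.mk ((PySem.List.pyRange 0 (m + 1) 1).map (fun i => (i, g i)))).insert k v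
             else (PySem.Dict.mk ((PySem.List.pyRange 0 (m + 1) 1).map (fun i => (i, g i)))).insert k (-v))
          else PySem.Dict.mk ((PySem.List.pyRange 0 (m + 1) 1).map (fun i => (i, g i))))
          = PySem.Dict.mk ((PySem.List.pyRange 0 (m + 1) 1).map
              (fun i => (i, if i = k then w else g i))) := by
        rw [hcont]
        have hins : ∀ u : Int,
            (PySem.Dict.mk ((PySem.List.pyRange 0 (m + 1) 1).map (fun i => (i, g i)))).insert k u
            = PySem.Dict.mk ((PySem.List.pyRange 0 (m + 1) 1).map
                (fun i => (i, if i = k then u else g i))) := by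
          intro u
          apply PySem.Dict.ext
          rw [PySem.Dict.items_insert_of_contains _ _ hcont]
          simp only [List.map_map]
          apply List.map_congr_left
          intro i _
          by_cases h : i = k <;> simp [h]
        cases minus <;> simp [hw, hins]
      rw [List.foldl_cons, hstep]
      have hb' : ∀ kv ∈ rest, 0 ≤ kv.1 ∧ kv.1 ≤ m := fun kv h => hb kv (by simp [h])
      have hnd' : (rest.map Prod.fst).Nodup := by
        simpa using hnd.of_cons
      rw [ih _ hb' hnd']
      apply List.map_congr_left
      intro i _
      have hkrest : (PySem.Dict.mk rest).get? k = none := by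
        rw [PySem.Dict.get?_eq_none_iff_not_mem_keys]
        simp only [PySem.Dict.keys_mk]
        intro hmem
        have : k ∈ rest.map Prod.fst := by simpa using hmem
        simp only [List.map_cons, List.nodup_cons] at hnd
        exact hnd.1 this
      by_cases h : i = k
      · subst h
        rw [PySem.Dict.get?_mk_cons]
        simp [hkrest, hw]
        cases minus <;> simp
      · rw [PySem.Dict.get?_mk_cons]
        have : (k == i) = false := by simp [Ne.symm h]
        simp [this, h]

-- A's result is the canonical items list.
lemma pv_A (dc : List (Int × Int)) (m : Int) (minus : Bool)
    (hpre : Pre_make_orders_coeffs dc m minus) :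
    make_orders_coeffs dc m minus
      = (PySem.List.pyRange 0 (m + 1) 1).map (fun i => (i, pvVal dc minus i)) := by
  unfold make_orders_coeffs
  rw [pv_fill_eq]
  rw [pv_loop_eq minus m dc (fun _ => 0) hpre.1 hpre.2]
  rfl

-- ===== VERDICT (by name: the statement is the Claim_ definition above) =====
theorem make_orders_coeffs_spec : Claim_equal_make_orders_coeffs := by
  intro dc m minus _ hpre
  unfold Spec_make_orders_coeffs
  by_cases hm : (0:Int) ≤ m + 1
  · -- A's side: zero-fill + overwrite loop = canonical items (proved below as pv_A)
    rw [pv_A dc m minus hpre]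
    -- B's side
    unfold make_orders_coeffs_alt
    have hnodup : ((PySem.Dict.mk dc).keys).Nodup := by
      simpa [PySem.Dict.keys] using hpre.2
    set ks := PySem.List.sorted ((PySem.Dict.mk dc).keys) (fun x => x) false with hks
    have hperm : ks.Perm ((PySem.Dict.mk dc).keys) := PySem.List.sorted_perm _ _ _
    have hksnd : ks.Nodup := hperm.nodup_iff.mpr hnodup
    have hple : ks.Pairwise (fun a b => a ≤ b) := PySem.List.sorted_pairwise _ _
    have hpw : ks.Pairwise (· < ·) :=
      (hple.and hksnd).imp (fun h => lt_of_le_of_ne h.1 h.2)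
    have hb : ∀ k ∈ ks, (0:Int) ≤ k ∧ k ≤ m := by
      intro k hkmem
      have : k ∈ (PySem.Dict.mk dc).keys := (PySem.List.mem_sorted _ _ _ _).mp hkmem
      simp only [PySem.Dict.keys] at this
      obtain ⟨kv, hkv, hke⟩ := List.mem_map.mp this
      have := hpre.1 kv hkv
      omega
    have hmem : ∀ i : Int, (0:Int) ≤ i → ((PySem.Dict.mk dc).get? i ≠ none ↔ i ∈ ks) := by
      intro i _
      rw [PySem.List.mem_sorted]
      constructor
      · intro h
        by_contra hni
        exact h ((PySem.Dict.get?_eq_none_iff_not_mem_keys _ _).mpr hni)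
      · intro h hn
        exact ((PySem.Dict.get?_eq_none_iff_not_mem_keys _ _).mp hn) h
    have hd0 : (PySem.Dict.empty : PySem.Dict Int Int).items
        = (PySem.List.pyRange 0 0 1).map (fun i => (i, pvVal dc minus i)) := by
      simp [PySem.Dict.empty, PySem.List.pyRange_one_eq_nil]
    have h := pv_gap dc minus m ks 0 PySem.Dict.empty le_rfl hm hpw hb hmem hd0
    simpa using h.symm
  · -- m + 1 < 0: Pre_ forces dc = [], both sides are the empty dict
    have hdc : dc = [] := by
      cases dc with
      | nil => rfl
      | cons kv rest =>
          exfalso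
          have := hpre.1 kv (by simp)
          omega
    subst hdc
    have hr : PySem.List.pyRange 0 (m + 1) 1 = [] :=
      PySem.List.pyRange_one_eq_nil (by omega)
    simp [make_orders_coeffs, make_orders_coeffs_alt, hr, PySem.List.sorted,
      PySem.Dict.empty]
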